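-- pv_equiv track=rewrite | github.com/ejucovy/hyperbmp | hyperbmp/lib.py | parse
-- ===== SOURCE A (Python) =====
-- def parse(content):
--     rows = []
--     for line in content.split('\n'):
--         if not line.strip():
--             continue
--         row = [i.strip() for i in line.split(',')]
--         if rows:
--             assert len(row) == len(rows[-1]), \
--                 "This doesn't look like a valid bitmap; the rows aren't all the same length."
--         rows.append(row)
--     return rows
-- ===== SOURCE B (Python) =====
-- def parse(content):
--     # Single-pass character scanner: tokenize fields and rows in one sweep,
--     # then validate all row lengths at once.
--     rows = []
--     row = []
--     field = []
--     for ch in content + '\n':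
--         if ch == ',':
--             row.append(''.join(field).strip())
--             field = []
--         elif ch == '\n':
--             if row or ''.join(field).strip():
--                 row.append(''.join(field).strip())
--                 rows.append(row)
--             row = []
--             field = []
--         else:
--             field.append(ch)
--     assert all(len(r) == len(rows[0]) for r in rows), \
--         "This doesn't look like a valid bitmap; the rows aren't all the same length."
--     return rows
-- ===== Notes on version B (the rewrite author's own statement) =====
-- stated objective: alternative
-- what changed: A splits the text into lines and each line into comma-fields with split/strip calls, checking lengths pairwise in the loop; B is a single-pass character scanner over content+' ' that tokenizes fields and rows in one sweep with an explicit (rows, row, field) state, then validates all row lengths in one aggregate check.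
-- outside the precondition, e.g. on parse('1,2\n3'): A raises AssertionError, B raises AssertionError
import Mathlib
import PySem

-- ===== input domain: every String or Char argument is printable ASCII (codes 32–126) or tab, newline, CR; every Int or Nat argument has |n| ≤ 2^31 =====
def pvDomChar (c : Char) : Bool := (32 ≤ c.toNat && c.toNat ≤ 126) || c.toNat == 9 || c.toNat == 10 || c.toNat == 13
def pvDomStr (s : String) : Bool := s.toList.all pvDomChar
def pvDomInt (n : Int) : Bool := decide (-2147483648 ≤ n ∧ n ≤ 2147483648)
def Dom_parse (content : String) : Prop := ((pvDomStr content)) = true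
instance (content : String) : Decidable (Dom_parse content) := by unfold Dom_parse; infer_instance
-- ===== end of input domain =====

-- B replaces A's per-line split/strip loop by a single-pass character scanner that tokenizes
-- fields and rows in one sweep (objective: alternative); return values agree on Pre_parse.

-- ===== PORT A =====
-- shared exact primitive: s.split(sep) for sep ≠ "" (split? returns none only for sep = "")
def pySplit (s sep : String) : List String := (PySem.Str.split? s sep).getD []

-- A's for-loop: accumulator 'rows', blank lines skipped, each row appended at the back.
-- The in-loop 'assert len(row) == len(rows[-1])' raises exactly outside Pre_parse, so on the
-- admitted inputs it always passes and is not part of the value computation.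
def parseLoop (rows : List (List String)) (lines : List String) : List (List String) :=
  match lines with
  | [] => rows
  | line :: rest =>
    if PySem.Str.strip line = "" then parseLoop rows rest
    else parseLoop (rows ++ [(pySplit line ",").map PySem.Str.strip]) rest

def parse (content : String) : List (List String) :=
  parseLoop [] (pySplit content "\n")

-- ===== PORT B =====
-- B's loop body: one step of the character scanner, state (rows, row, field);
-- ''.join(field).strip() is PySem.Str.strip (String.ofList field).
def scanStep (st : List (List String) × List String × List Char) (ch : Char) :
    List (List String) × List String × List Char :=
  match st with
  | (rows, row, field) =>
    if ch = ',' then (rows, row ++ [PySem.Str.strip (String.ofList field)], [])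
    else if ch = '\n' then
      if row ≠ [] ∨ PySem.Str.strip (String.ofList field) ≠ "" then
        (rows ++ [row ++ [PySem.Str.strip (String.ofList field)]], [], [])
      else (rows, [], [])
    else (rows, row, field ++ [ch])

-- B's 'for ch in content + '\n'' over the scanner state; B's final aggregate
-- 'assert all(len(r) == len(rows[0]) ...)' raises exactly outside Pre_parse (the same inputs
-- as A's in-loop assert), so it is not part of the value computation on the admitted inputs.
def parse_alt (content : String) : List (List String) :=
  ((content.toList ++ ['\n']).foldl scanStep ([], [], [])).1

-- ===== PRECONDITION & SPEC =====
-- Pre_ excludes exactly the inputs on which Python A raises AssertionError (two non-blank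
-- lines with a different number of comma-separated fields); Python B raises there too.
def Pre_parse (content : String) : Prop :=
  ∀ l₁ ∈ pySplit content "\n", ∀ l₂ ∈ pySplit content "\n",
    PySem.Str.strip l₁ ≠ "" → PySem.Str.strip l₂ ≠ "" →
    (pySplit l₁ ",").length = (pySplit l₂ ",").length
instance (content : String) : Decidable (Pre_parse content) := by unfold Pre_parse; infer_instance

def pvWitness_parse : String := "1, 2\n3,4\n\n5 ,6"

def Spec_parse (content : String) (out : List (List String)) : Prop := out = parse_alt content
instance (content : String) (out : List (List String)) : Decidable (Spec_parse content out) := by unfold Spec_parse; infer_instance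

-- ===== CLAIM (what is proved, stated in full; the proofs are below) =====
def Claim_equal_parse : Prop := ∀ (content : String), Dom_parse content → Pre_parse content → Spec_parse content (parse content)

-- ===== LEMMAS AND PROOFS =====
def splitC (c : Char) : List Char → List (List Char)
  | [] => [[]]
  | x :: xs => if x = c then [] :: splitC c xs else (splitC c xs).modifyHead (x :: ·)

theorem splitC_ne_nil (c : Char) (l : List Char) : splitC c l ≠ [] := by
  induction l with
  | nil => simp [splitC]
  | cons x xs ih =>
    simp only [splitC]
    split
    · simp
    · cases h : splitC c xs with
      | nil => exact absurd h ih
      | cons p ps => simp [List.modifyHead]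

theorem go_spec (c : Char) (fuel : Nat) : ∀ (l cur : List Char) (acc : List (List Char)),
    l.length ≤ fuel →
    PySem.Chars.splitOn.go [c] fuel l cur acc =
      acc.reverse ++ (splitC c l).modifyHead (cur.reverse ++ ·) := by
  induction fuel with
  | zero =>
    intro l cur acc h
    have : l = [] := List.length_eq_zero_iff.mp (Nat.le_zero.mp h)
    subst this
    simp [PySem.Chars.splitOn.go, splitC, List.modifyHead]
  | succ fuel ih =>
    intro l cur acc h
    cases l with
    | nil => simp [PySem.Chars.splitOn.go, splitC, List.modifyHead]
    | cons x xs =>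
      simp only [PySem.Chars.splitOn.go]
      by_cases hx : x = c
      · subst hx
        have hp : [x].isPrefixOf (x :: xs) = true := by simp [List.isPrefixOf]
        rw [if_pos hp, ih _ _ _ (by simpa using Nat.le_of_succ_le_succ h)]
        simp only [splitC, List.modifyHead]
        cases h2 : splitC x xs with
        | nil => exact absurd h2 (splitC_ne_nil x xs)
        | cons p ps => simp [h2]
      · have hp : [c].isPrefixOf (x :: xs) = false := by
          simp [List.isPrefixOf]
          exact fun h' => absurd h'.symm hx
        rw [if_neg (by simp [hp]), ih _ _ _ (by simpa using Nat.le_of_succ_le_succ h)]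
        simp only [splitC, if_neg hx]
        cases h : splitC c xs with
        | nil => exact absurd h (splitC_ne_nil c xs)
        | cons p ps => simp [List.modifyHead]

theorem splitOn_singleton (c : Char) (l : List Char) :
    PySem.Chars.splitOn l [c] = splitC c l := by
  have := go_spec c (l.length + 1) l [] [] (by omega)
  rw [PySem.Chars.splitOn, this]
  simp
  cases h : splitC c l with
  | nil => exact absurd h (splitC_ne_nil c l)
  | cons p ps => simp [List.modifyHead]

theorem splitC_no_sep (c : Char) (l : List Char) (h : c ∉ l) : splitC c l = [l] := by
  induction l with
  | nil => simp [splitC]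
  | cons x xs ih =>
    simp only [List.mem_cons, not_or] at h
    simp [splitC, Ne.symm h.1, ih h.2, List.modifyHead]

theorem splitC_append_no_sep (c : Char) (a b : List Char) (h : c ∉ a) :
    splitC c (a ++ b) = (splitC c b).modifyHead (a ++ ·) := by
  induction a with
  | nil =>
    cases h2 : splitC c b with
    | nil => exact absurd h2 (splitC_ne_nil c b)
    | cons p ps => simp [h2, List.modifyHead]
  | cons x xs ih =>
    simp only [List.mem_cons, not_or] at h
    rw [List.cons_append, splitC, if_neg (Ne.symm h.1), ih h.2]
    cases h2 : splitC c b with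
    | nil => exact absurd h2 (splitC_ne_nil c b)
    | cons p ps => simp [List.modifyHead]

theorem splitC_two_le (c : Char) (l : List Char) (h : c ∈ l) : 2 ≤ (splitC c l).length := by
  induction l with
  | nil => simp at h
  | cons x xs ih =>
    by_cases hx : x = c
    · have h1 := splitC_ne_nil c xs
      simp only [splitC, if_pos hx, List.length_cons]
      cases h2 : splitC c xs with
      | nil => exact absurd h2 h1
      | cons p ps => simp
    · have hm : c ∈ xs := by
        rcases List.mem_cons.mp h with h' | h'
        · exact absurd h'.symm hx
        · exact h'
      rw [splitC, if_neg hx]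
      cases h2 : splitC c xs with
      | nil => exact absurd h2 (splitC_ne_nil c xs)
      | cons p ps => have := ih hm; rw [h2] at this; simpa [List.modifyHead] using this

theorem not_mem_of_mem_splitC (c : Char) (l p : List Char) (hp : p ∈ splitC c l) : c ∉ p := by
  induction l generalizing p with
  | nil => simp [splitC] at hp; simp [hp]
  | cons x xs ih =>
    by_cases hx : x = c
    · simp only [splitC, if_pos hx, List.mem_cons] at hp
      rcases hp with h | h
      · simp [h]
      · exact ih p h
    · simp only [splitC, if_neg hx] at hp
      cases h2 : splitC c xs with
      | nil => exact absurd h2 (splitC_ne_nil c xs)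
      | cons q qs =>
        rw [h2, List.modifyHead] at hp
        rcases List.mem_cons.mp hp with h | h
        · subst h
          intro hc
          rcases List.mem_cons.mp hc with h' | h'
          · exact hx h'.symm
          · exact ih q (by rw [h2]; exact List.mem_cons_self) h'
        · exact ih p (by rw [h2]; exact List.mem_cons_of_mem _ h)

def interC (c : Char) : List (List Char) → List Char
  | [] => []
  | [p] => p
  | p :: q :: ps => p ++ c :: interC c (q :: ps)

theorem interC_splitC (c : Char) (l : List Char) : interC c (splitC c l) = l := by
  induction l with
  | nil => simp [splitC, interC]
  | cons x xs ih =>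
    by_cases hx : x = c
    · subst hx
      rw [splitC, if_pos rfl]
      cases h2 : splitC x xs with
      | nil => exact absurd h2 (splitC_ne_nil x xs)
      | cons p ps => rw [interC, ← h2, ih]; rfl
    · rw [splitC, if_neg hx]
      cases h2 : splitC c xs with
      | nil => exact absurd h2 (splitC_ne_nil c xs)
      | cons p ps =>
        rw [List.modifyHead]
        cases ps with
        | nil => rw [interC]; rw [h2, interC] at ih; simpa using ih
        | cons q qs =>
          rw [h2, interC] at ih
          rw [interC, List.cons_append, ih]

theorem strip_ne_nil_of_mem (l : List Char) (x : Char) (hx : x ∈ l) (hs : PySem.Chars.isspace x = false) :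
    PySem.Chars.strip l ≠ [] := by
  intro h
  rw [PySem.Chars.strip, PySem.Chars.rstrip] at h
  have h1 : List.dropWhile PySem.Chars.isspace (PySem.Chars.lstrip l).reverse = [] := by
    have := congrArg List.reverse h
    simpa using this
  rw [List.dropWhile_eq_nil_iff] at h1
  rw [PySem.Chars.lstrip] at h1
  have : ∀ y ∈ l, PySem.Chars.isspace y = true := by
    intro y hy
    have hy' : y ∈ List.takeWhile PySem.Chars.isspace l ++ List.dropWhile PySem.Chars.isspace l := by
      rw [List.takeWhile_append_dropWhile]; exact hy
    rcases List.mem_append.mp hy' with h | h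
    · exact List.mem_takeWhile_imp h
    · exact h1 y (by simpa using h)
  rw [this x hx] at hs; exact Bool.noConfusion hs

-- abbreviation for 'strip of a char list, as a String'
def SS (l : List Char) : String := PySem.Str.strip (String.ofList l)

theorem SS_eq (l : List Char) : SS l = String.ofList (PySem.Chars.strip l) := by
  simp [SS, PySem.Str.strip]

theorem SS_eq_empty_iff (l : List Char) : (SS l = "") ↔ PySem.Chars.strip l = [] := by
  rw [SS_eq]
  constructor
  · intro h; have := congrArg String.toList h; simpa using this
  · intro h; simp [h]

theorem scanStep_newline (rows : List (List String)) (row : List String) (field : List Char) :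
    scanStep (rows, row, field) '\n' =
      if row ≠ [] ∨ SS field ≠ "" then (rows ++ [row ++ [SS field]], [], []) else (rows, [], []) := by
  rw [show scanStep (rows, row, field) '\n' =
      (if ('\n' = ',') then (rows, row ++ [SS field], [])
       else if ('\n' = '\n') then
         (if row ≠ [] ∨ SS field ≠ "" then (rows ++ [row ++ [SS field]], [], []) else (rows, [], []))
       else (rows, row, field ++ ['\n'])) from rfl]
  rw [if_neg (by decide), if_pos rfl]

theorem scanStep_comma (rows : List (List String)) (row : List String) (field : List Char) :
    scanStep (rows, row, field) ',' = (rows, row ++ [SS field], []) := rfl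

theorem scanStep_other (rows : List (List String)) (row : List String) (field : List Char)
    (ch : Char) (h1 : ch ≠ ',') (h2 : ch ≠ '\n') :
    scanStep (rows, row, field) ch = (rows, row, field ++ [ch]) := by
  rw [show scanStep (rows, row, field) ch =
      (if (ch = ',') then (rows, row ++ [SS field], [])
       else if (ch = '\n') then
         (if row ≠ [] ∨ SS field ≠ "" then (rows ++ [row ++ [SS field]], [], []) else (rows, [], []))
       else (rows, row, field ++ [ch])) from rfl]
  rw [if_neg h1, if_neg h2]

theorem scan_line (l : List Char) (hl : '\n' ∉ l) :
    ∀ (rows : List (List String)) (row : List String) (field : List Char), ',' ∉ field →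
    List.foldl scanStep (rows, row, field) l =
      (rows, row ++ ((splitC ',' (field ++ l)).dropLast).map SS,
       (splitC ',' (field ++ l)).getLastD []) := by
  induction l with
  | nil =>
    intro rows row field hf
    rw [splitC_no_sep ',' (field ++ []) (by simpa using hf)]
    simp
  | cons x xs ih =>
    intro rows row field hf
    simp only [List.mem_cons, not_or] at hl
    by_cases hx : x = ','
    · subst hx
      rw [List.foldl_cons]
      rw [scanStep_comma]
      rw [ih hl.2 rows (row ++ [SS field]) [] (by simp)]
      rw [splitC_append_no_sep ',' field (',' :: xs) hf]
      rw [show splitC ',' (',' :: xs) = [] :: splitC ',' xs by simp [splitC]]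
      cases h2 : splitC ',' xs with
      | nil => exact absurd h2 (splitC_ne_nil _ _)
      | cons p ps =>
        simp [h2, List.modifyHead, List.dropLast_cons_of_ne_nil, List.getLastD]
    · have hx2 : x ≠ '\n' := fun h => hl.1 h.symm
      rw [List.foldl_cons]
      rw [scanStep_other rows row field x hx hx2]
      rw [ih hl.2 rows row (field ++ [x]) (by
        intro h
        rcases List.mem_append.mp h with h | h
        · exact hf h
        · simp at h; exact hx h.symm)]
      simp

theorem map_dl_gl : ∀ ps : List (List Char), ps ≠ [] →
    List.map SS ps.dropLast ++ [SS (ps.getLastD [])] = List.map SS ps := by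
  intro ps
  induction ps with
  | nil => intro h; exact absurd rfl h
  | cons p qs ih =>
    intro _
    cases qs with
    | nil => simp
    | cons q rs =>
      have h1 : (q :: rs).getLastD p = (q :: rs).getLastD [] := by
        rw [List.getLastD_eq_getLast?, List.getLastD_eq_getLast?,
          List.getLast?_eq_some_getLast (by simp : (q :: rs) ≠ [])]
        simp
      rw [List.dropLast_cons_of_ne_nil (by simp), List.map_cons, List.cons_append,
        List.getLastD_cons, h1, List.map_cons, ih (by simp)]

theorem scan_full_line (l : List Char) (hl : '\n' ∉ l) (rows : List (List String)) :
    List.foldl scanStep (rows, [], []) (l ++ ['\n']) =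
      (rows ++ (if PySem.Chars.strip l = [] then [] else [(splitC ',' l).map SS]), [], []) := by
  rw [List.foldl_append, scan_line l hl rows [] [] (by simp)]
  simp only [List.nil_append, List.foldl_cons, List.foldl_nil]
  rw [scanStep_newline]
  by_cases hc : ',' ∈ l
  · have h2 := splitC_two_le ',' l hc
    have hstrip : PySem.Chars.strip l ≠ [] :=
      strip_ne_nil_of_mem l ',' hc (by decide)
    rw [if_neg hstrip]
    cases h3 : splitC ',' l with
    | nil => exact absurd h3 (splitC_ne_nil _ _)
    | cons p ps =>
      cases ps with
      | nil => rw [h3] at h2; simp at h2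
      | cons q qs =>
        have hrow : List.map SS ((p :: q :: qs).dropLast) ≠ [] := by
          simp [List.dropLast_cons_of_ne_nil]
        rw [if_pos (Or.inl hrow), map_dl_gl (p :: q :: qs) (by simp)]
  · rw [splitC_no_sep ',' l hc]
    simp only [List.dropLast, List.map_nil, List.getLastD_cons, List.getLastD_nil]
    by_cases hstrip : PySem.Chars.strip l = []
    · rw [if_pos hstrip, if_neg]
      · simp
      · rw [not_or, not_ne_iff, not_ne_iff]
        exact ⟨rfl, (SS_eq_empty_iff l).mpr hstrip⟩
    · rw [if_neg hstrip, if_pos (Or.inr (fun h => hstrip ((SS_eq_empty_iff l).mp h)))]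
      simp

def aRowsC (lines : List (List Char)) : List (List String) :=
  (lines.filter (fun l => !(PySem.Chars.strip l).isEmpty)).map (fun l => (splitC ',' l).map SS)

theorem scan_lines (lines : List (List Char)) (hl : ∀ p ∈ lines, '\n' ∉ p) :
    ∀ rows : List (List String),
    List.foldl scanStep (rows, [], []) (interC '\n' lines ++ ['\n']) =
      (rows ++ aRowsC lines, [], []) := by
  induction lines with
  | nil =>
    intro rows
    rw [interC, List.nil_append, List.foldl_cons, List.foldl_nil, scanStep_newline, if_neg]
    · simp [aRowsC]
    · rw [not_or, not_ne_iff, not_ne_iff]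
      exact ⟨rfl, (SS_eq_empty_iff []).mpr rfl⟩
  | cons l ls ih =>
    intro rows
    have hln : '\n' ∉ l := hl l List.mem_cons_self
    cases ls with
    | nil =>
      rw [interC, scan_full_line l hln rows]
      simp only [aRowsC, List.filter]
      by_cases hs : PySem.Chars.strip l = []
      · simp [hs]
      · simp only [if_neg hs]
        rw [show (!(PySem.Chars.strip l).isEmpty) = true by simpa [List.isEmpty_iff] using hs]
        simp
    | cons m ms =>
      rw [interC, List.append_assoc, List.cons_append,
        show l ++ ('\n' :: (interC '\n' (m :: ms) ++ ['\n'])) = (l ++ ['\n']) ++ (interC '\n' (m :: ms) ++ ['\n']) by simp,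
        List.foldl_append, scan_full_line l hln rows,
        ih (fun p hp => hl p (List.mem_cons_of_mem _ hp))]
      simp only [aRowsC, List.filter]
      by_cases hs : PySem.Chars.strip l = []
      · rw [show (!(PySem.Chars.strip l).isEmpty) = false by simpa [List.isEmpty_iff] using hs]
        simp [hs]
      · rw [show (!(PySem.Chars.strip l).isEmpty) = true by simpa [List.isEmpty_iff] using hs]
        simp [if_neg hs]

theorem parse_alt_eq (content : String) :
    parse_alt content = aRowsC (splitC '\n' content.toList) := by
  have h := scan_lines (splitC '\n' content.toList)
    (fun p hp => not_mem_of_mem_splitC _ _ p hp) []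
  rw [interC_splitC] at h
  rw [parse_alt, h]
  simp

theorem parseLoop_eq (lines : List String) (rows : List (List String)) :
    parseLoop rows lines =
      rows ++ (lines.filter (fun line => !(PySem.Str.strip line == ""))).map
        (fun line => (pySplit line ",").map PySem.Str.strip) := by
  induction lines generalizing rows with
  | nil => simp [parseLoop]
  | cons line rest ih =>
    by_cases h : PySem.Str.strip line = "" <;>
      simp [parseLoop, h, ih]

theorem pySplit_eq (s : String) (c : Char) :
    pySplit s (String.ofList [c]) = (splitC c s.toList).map String.ofList := by
  rw [pySplit, PySem.Str.split?]
  rw [show (String.ofList [c]).toList = [c] by simp]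
  rw [PySem.Chars.split?, if_neg (by simp : ¬(List.isEmpty [c] = true)), splitOn_singleton]
  rfl

theorem parse_eq (content : String) :
    parse content = aRowsC (splitC '\n' content.toList) := by
  rw [parse, parseLoop_eq, List.nil_append,
    show ("\n" : String) = String.ofList ['\n'] from rfl,
    pySplit_eq content '\n',
    List.filter_map, List.map_map]
  rw [aRowsC]
  have h1 : List.filter ((fun line => !(PySem.Str.strip line == "")) ∘ String.ofList)
      (splitC '\n' content.toList)
      = List.filter (fun l => !(PySem.Chars.strip l).isEmpty) (splitC '\n' content.toList) := by
    apply List.filter_congr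
    intro l _
    simp only [Function.comp]
    by_cases hs : PySem.Chars.strip l = []
    · rw [show (PySem.Str.strip (String.ofList l) == "") = true by
          simpa using (SS_eq_empty_iff l).mpr hs,
        show (PySem.Chars.strip l).isEmpty = true by simpa [List.isEmpty_iff] using hs]
    · rw [show (PySem.Str.strip (String.ofList l) == "") = false by
          simpa using (fun h => hs ((SS_eq_empty_iff l).mp h)),
        show (PySem.Chars.strip l).isEmpty = false by simpa [List.isEmpty_iff] using hs]
  rw [h1]
  apply List.map_congr_left
  intro l _
  simp only [Function.comp]
  rw [pySplit_eq (String.ofList l) ',', show (String.ofList l).toList = l by simp, List.map_map]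
  rfl

-- ===== VERDICT (by name: the statement is the Claim_ definition above) =====
theorem parse_spec : Claim_equal_parse := by
  intro content _ _
  unfold Spec_parse
  rw [parse_eq, parse_alt_eq]
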